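-- pv_equiv track=rewrite | github.com/starsalwaysineyes/ctx-cli-skill | contexthub/service.py | _find_block_positions
-- ===== SOURCE A (Python) =====
-- def _find_block_positions(lines: list[str], needle: list[str]) -> list[int]:
--     positions = []
--     if not needle:
--         return positions
--     max_start = len(lines) - len(needle)
--     for start in range(max_start + 1):
--         if lines[start : start + len(needle)] == needle:
--             positions.append(start)
--     return positions
-- ===== SOURCE B (Python) =====
-- def _find_block_positions(lines: list[str], needle: list[str]) -> list[int]:
--     if not needle:
--         return []
--     # pattern-major sieve: start with every feasible start, then one pass per
--     # needle line j narrows the surviving starts to those with lines[i+j] == needle[j]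
--     candidates = list(range(len(lines) - len(needle) + 1))
--     for j, pat in enumerate(needle):
--         candidates = [i for i in candidates if lines[i + j] == pat]
--     return candidates
-- ===== Notes on version B (the rewrite author's own statement) =====
-- stated objective: alternative
-- what changed: B replaces A's text-major scan (compare the full needle slice at every start) with a pattern-major sieve: it starts from all feasible start positions and makes one filtering pass per needle line, keeping only starts whose (i+j)-th line equals needle[j], so no list slicing happens at all.
import Mathlib
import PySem

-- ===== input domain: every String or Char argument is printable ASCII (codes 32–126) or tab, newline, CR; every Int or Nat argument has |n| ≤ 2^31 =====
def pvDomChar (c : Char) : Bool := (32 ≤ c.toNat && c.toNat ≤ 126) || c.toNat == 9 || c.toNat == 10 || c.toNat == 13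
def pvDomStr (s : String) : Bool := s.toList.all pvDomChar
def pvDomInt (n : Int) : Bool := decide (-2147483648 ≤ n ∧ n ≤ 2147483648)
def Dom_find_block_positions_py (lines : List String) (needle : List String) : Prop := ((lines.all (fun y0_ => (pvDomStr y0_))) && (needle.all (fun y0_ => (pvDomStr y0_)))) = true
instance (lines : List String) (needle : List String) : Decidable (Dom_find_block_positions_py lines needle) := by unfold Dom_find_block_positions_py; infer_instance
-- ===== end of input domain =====

-- B replaces A's text-major scan (full-needle slice compare at every start) with a
-- pattern-major sieve: start from all feasible starts, then one filtering pass per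
-- needle line keeps only the starts i with lines[i+j] == needle[j]; no slicing at all.

-- ===== PORT A =====
def find_block_positions_py (lines : List String) (needle : List String) : List Int :=
  if needle = [] then []
  else
    let max_start : Int := (lines.length : Int) - (needle.length : Int)
    (PySem.List.pyRange 0 (max_start + 1) 1).foldl
      (fun positions start =>
        if PySem.List.slice lines (some start) (some (start + (needle.length : Int))) = needle
        then positions ++ [start] else positions) []

-- ===== PORT B =====
def find_block_positions_py_alt (lines : List String) (needle : List String) : List Int :=
  if needle = [] then []
  else
    (PySem.List.enumerate needle 0).foldl
      (fun candidates jp =>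
        candidates.filter (fun i => PySem.List.pyGet? lines (i + jp.1) == some jp.2))
      (PySem.List.pyRange 0 ((lines.length : Int) - (needle.length : Int) + 1) 1)

-- ===== PRECONDITION & SPEC =====
def Spec_find_block_positions_py (lines : List String) (needle : List String) (out : List Int) : Prop := out = find_block_positions_py_alt lines needle
instance (lines : List String) (needle : List String) (out : List Int) : Decidable (Spec_find_block_positions_py lines needle out) := by unfold Spec_find_block_positions_py; infer_instance

-- ===== CLAIM (what is proved, stated in full; the proofs are below) =====
def Claim_equal_find_block_positions_py : Prop := ∀ (lines : List String) (needle : List String), Dom_find_block_positions_py lines needle → Spec_find_block_positions_py lines needle (find_block_positions_py lines needle)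

-- ===== LEMMAS AND PROOFS =====

-- B's staged filtering passes collapse into one filter by the conjunction of all per-line tests
theorem pvSieve (lines : List String) :
    ∀ (ps : List (Int × String)) (cands : List Int),
      ps.foldl (fun c jp => c.filter (fun i => PySem.List.pyGet? lines (i + jp.1) == some jp.2)) cands
        = cands.filter (fun i => ps.all (fun jp => PySem.List.pyGet? lines (i + jp.1) == some jp.2)) := by
  intro ps
  induction ps with
  | nil => intro cands; simp
  | cons p ps ih =>
    intro cands
    rw [List.foldl_cons, ih, List.filter_filter]
    simp [Bool.and_comm]

-- the conjunction of the per-line tests over enumerate is exactly the window-equality A tests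
theorem pvMatch (lines : List String) :
    ∀ (xs : List String) (b s : Int), 0 ≤ b + s →
      (((PySem.List.enumerate xs s).all
          (fun jp => PySem.List.pyGet? lines (b + jp.1) == some jp.2)) = true
        ↔ (lines.drop (b + s).toNat).take xs.length = xs) := by
  intro xs
  induction xs with
  | nil => intro b s _; simp [PySem.List.enumerate_nil]
  | cons x xs ih =>
    intro b s hbs
    rw [PySem.List.enumerate_cons]
    have hget : PySem.List.pyGet? lines (b + s) = lines[(b + s).toNat]? := by
      rw [show b + s = (((b + s).toNat : Nat) : Int) by omega]; simp [pysem]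
    cases hdrop : lines.drop (b + s).toNat with
    | nil =>
      have hlen : lines.length ≤ (b + s).toNat := List.drop_eq_nil_iff.mp hdrop
      have : lines[(b + s).toNat]? = none := by
        exact List.getElem?_eq_none hlen
      simp [hget, this]
    | cons y ys =>
      have hy : lines[(b + s).toNat]? = some y := by
        have := congrArg (fun l : List String => l[0]?) hdrop
        simpa using this
      have hys : lines.drop ((b + s).toNat + 1) = ys := by
        have := congrArg (List.drop 1) hdrop
        simpa [List.drop_drop, Nat.add_comm] using this
      have ihs := ih b (s + 1) (by omega)
      have ht : (b + (s + 1)).toNat = (b + s).toNat + 1 := by omega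
      rw [ht, hys] at ihs
      constructor
      · intro h
        simp only [List.all_cons, Bool.and_eq_true, beq_iff_eq] at h
        obtain ⟨h1, h2⟩ := h
        rw [hget, hy] at h1
        have h3 := ihs.mp h2
        simp only [List.length_cons, List.take_succ_cons]
        rw [h3]
        injection h1 with h1; rw [h1]
      · intro h
        simp only [List.length_cons, List.take_succ_cons] at h
        obtain ⟨h1, h2⟩ := List.cons_eq_cons.mp h
        simp only [List.all_cons, Bool.and_eq_true, beq_iff_eq]
        exact ⟨by rw [hget, hy, h1], ihs.mpr h2⟩

-- ===== VERDICT (by name: the statement is the Claim_ definition above) =====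
theorem find_block_positions_py_spec : Claim_equal_find_block_positions_py := by
  intro lines needle _
  unfold Spec_find_block_positions_py find_block_positions_py find_block_positions_py_alt
  by_cases hne : needle = []
  · simp [hne]
  · rw [if_neg hne, if_neg hne]
    -- A's append-loop is a filter over the range of starts
    have hA := PySem.List.foldl_append_if
      (p := fun start => decide (PySem.List.slice lines (some start)
              (some (start + (needle.length : Int))) = needle))
      (f := id)
      (PySem.List.pyRange 0 ((lines.length : Int) - (needle.length : Int) + 1) 1) []
    simp only [id_eq, List.map_id, List.nil_append, decide_eq_true_eq] at hA
    simp only [hA, pvSieve]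
    apply List.filter_congr
    intro i hi
    have hmem := (PySem.List.mem_pyRange_one).mp hi
    have hi0 : 0 ≤ i := hmem.1
    have hslice : PySem.List.slice lines (some i) (some (i + (needle.length : Int)))
        = (lines.drop i.toNat).take needle.length := by
      rw [PySem.List.slice_toNat lines hi0 (by omega)]
      congr 1
      omega
    have hm := pvMatch lines needle i 0 (by omega)
    simp only [add_zero] at hm
    rw [Bool.eq_iff_iff, decide_eq_true_eq, hslice]
    exact hm.symm
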